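-- pv_equiv track=rewrite | github.com/CagesThrottleUs/contests-solution | generate.py | extract_problem_code
-- ===== SOURCE A (Python) =====
-- def extract_problem_code(problem_content: str) -> str:
--     """Extract only the implementation from problem file."""
--     lines = problem_content.split('\n')
--     result: list[str] = []
--     skip_block_comment = False
--
--     for line in lines:
--         # Skip problem comment and includes already in template
--         if line.startswith('// Problem:'):
--             continue
--         # Skip copyright/license block comment (/* ... */)
--         stripped = line.strip()
--         if stripped.startswith('/*'):
--             skip_block_comment = True
--         if skip_block_comment:
--             if '*/' in line:
--                 skip_block_comment = False
--             continue
--         result.append(line)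
--
--     return '\n'.join(result).strip()
-- ===== SOURCE B (Python) =====
-- def extract_problem_code(problem_content: str) -> str:
--     """Extract only the implementation from problem file."""
--     lines = problem_content.split('\n')
--     result = []
--     i = 0
--     n = len(lines)
--     while i < n:
--         line = lines[i]
--         if line.startswith('// Problem:'):
--             i += 1
--             continue
--         if line.strip().startswith('/*'):
--             # consume the whole /* ... */ block at once
--             while i < n and '*/' not in lines[i]:
--                 i += 1
--             i += 1
--             continue
--         result.append(line)
--         i += 1
--     return '\n'.join(result).strip()
-- ===== Notes on version B (the rewrite author's own statement) =====
-- stated objective: alternative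
-- what changed: Replaces the for-loop carrying a skip_block_comment flag by an index-driven outer while loop whose nested inner loop consumes a whole /*..*/ block at once, so no boolean comment state crosses lines; Pre_ excludes inputs with a line that both starts with '// Problem:' and contains '*/', an unspecifiable mix of the two comment markers on which A's check order leaves the block open while B closes it — either reading is defensible.
-- outside the precondition, e.g. on extract_problem_code('/*\n// Problem: */\nx'): A returns '', B returns 'x'
import Mathlib
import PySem

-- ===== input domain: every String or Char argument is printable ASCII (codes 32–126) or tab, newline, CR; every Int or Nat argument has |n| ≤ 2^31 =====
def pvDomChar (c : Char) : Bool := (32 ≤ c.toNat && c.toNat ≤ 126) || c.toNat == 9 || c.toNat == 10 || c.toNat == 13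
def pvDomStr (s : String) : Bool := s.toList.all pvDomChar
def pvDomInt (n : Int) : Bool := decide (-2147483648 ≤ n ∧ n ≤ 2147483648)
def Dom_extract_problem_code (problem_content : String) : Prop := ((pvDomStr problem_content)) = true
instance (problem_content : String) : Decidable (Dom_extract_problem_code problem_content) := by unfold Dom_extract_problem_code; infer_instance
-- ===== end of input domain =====

-- B replaces A's per-line skip flag by an outer index loop with a nested loop that
-- consumes each /*..*/ block in one go (objective: alternative decomposition, same cost).

-- ===== PORT A =====
-- one iteration of A's for-loop: state = (result, skip_block_comment);
-- 'if stripped.startswith("/*"): skip = True' is ported as skip := test || old skip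
def pvStepA (st : List String × Bool) (line : String) : List String × Bool :=
  if PySem.Str.startswith line "// Problem:" then st
  else
    let skip := PySem.Str.startswith (PySem.Str.strip line) "/*" || st.2
    if skip then (st.1, if PySem.Str.isIn "*/" line then false else skip)
    else (st.1 ++ [line], skip)

def extract_problem_code (problem_content : String) : String :=
  PySem.Str.strip (PySem.Str.join "\n"
    (((PySem.Str.split? problem_content "\n").getD []).foldl pvStepA ([], false)).1)

-- ===== PORT B =====
-- Source B's inner while loop plus the final i += 1: starting AT the '/*' line,
-- drop lines while they contain no '*/', then drop the closing line too
def pvConsumeB (lines : List String) : List String :=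
  match lines with
  | [] => []
  | l :: rs => if PySem.Str.isIn "*/" l then rs else pvConsumeB rs

theorem pvConsumeB_length (l : String) (rs : List String) :
    (pvConsumeB (l :: rs)).length ≤ rs.length := by
  induction rs generalizing l with
  | nil => unfold pvConsumeB; split <;> simp [pvConsumeB]
  | cons l2 rs2 ih =>
      unfold pvConsumeB; split
      · simp
      · exact le_trans (ih l2) (by simp)

-- Source B's outer while loop (the index i becomes recursion on the remaining lines)
def pvLoopB (lines : List String) : List String :=
  match lines with
  | [] => []
  | line :: rest =>
    if PySem.Str.startswith line "// Problem:" then pvLoopB rest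
    else if PySem.Str.startswith (PySem.Str.strip line) "/*" then
      pvLoopB (pvConsumeB (line :: rest))
    else line :: pvLoopB rest
termination_by lines.length
decreasing_by
  · simp
  · simpa using Nat.lt_succ_of_le (pvConsumeB_length line rest)
  · simp

def extract_problem_code_alt (problem_content : String) : String :=
  PySem.Str.strip (PySem.Str.join "\n"
    (pvLoopB ((PySem.Str.split? problem_content "\n").getD [])))

-- ===== PRECONDITION & SPEC =====
-- Pre_ excludes inputs containing a line that both starts with '// Problem:' and
-- contains '*/': on that unspecifiable mix of the two comment markers, A's check
-- order skips the line without closing an open /* block while B closes the block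
-- there — either reading is defensible, so nothing is claimed on those inputs.
def Pre_extract_problem_code (problem_content : String) : Prop :=
  (((PySem.Str.split? problem_content "\n").getD []).all
    (fun l => !(PySem.Str.startswith l "// Problem:" && PySem.Str.isIn "*/" l))) = true
instance (problem_content : String) : Decidable (Pre_extract_problem_code problem_content) := by unfold Pre_extract_problem_code; infer_instance

def pvWitness_extract_problem_code : String := "/* license */\n// Problem: 1A\nint x;"

def Spec_extract_problem_code (problem_content : String) (out : String) : Prop := out = extract_problem_code_alt problem_content
instance (problem_content : String) (out : String) : Decidable (Spec_extract_problem_code problem_content out) := by unfold Spec_extract_problem_code; infer_instance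

-- ===== CLAIM (what is proved, stated in full; the proofs are below) =====
def Claim_equal_extract_problem_code : Prop := ∀ (problem_content : String), Dom_extract_problem_code problem_content → Pre_extract_problem_code problem_content → Spec_extract_problem_code problem_content (extract_problem_code problem_content)

-- ===== LEMMAS AND PROOFS =====

-- one line is admissible: it does not both start with '// Problem:' and contain '*/'
def pvOkLine (l : String) : Prop :=
  (!(PySem.Str.startswith l "// Problem:" && PySem.Str.isIn "*/" l)) = true

theorem pvConsumeB_cons (l : String) (rs : List String) :
    pvConsumeB (l :: rs) = if PySem.Str.isIn "*/" l then rs else pvConsumeB rs := rfl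

theorem pvConsumeB_sublist (lines : List String) :
    ∀ l, l ∈ pvConsumeB lines → l ∈ lines := by
  induction lines with
  | nil => simp [pvConsumeB]
  | cons x rs ih =>
      intro l hl
      rw [pvConsumeB_cons] at hl
      by_cases h : PySem.Str.isIn "*/" x = true
      · rw [if_pos h] at hl; exact List.mem_cons_of_mem _ hl
      · rw [if_neg h] at hl; exact List.mem_cons_of_mem _ (ih l hl)

theorem pvConsumeB_le (ls : List String) : (pvConsumeB ls).length ≤ ls.length := by
  match ls with
  | [] => simp [pvConsumeB]
  | l :: rs =>
      exact le_trans (pvConsumeB_length l rs) (by simp only [List.length_cons]; omega)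

theorem pvLoopB_cons (l : String) (rs : List String) :
    pvLoopB (l :: rs) =
      if PySem.Str.startswith l "// Problem:" then pvLoopB rs
      else if PySem.Str.startswith (PySem.Str.strip l) "/*" then
        pvLoopB (pvConsumeB (l :: rs))
      else l :: pvLoopB rs := by
  rw [pvLoopB]

-- A's for-loop while skip_block_comment is set drops exactly the lines B's inner loop drops
theorem foldA_true (lines : List String) (res : List String)
    (hok : ∀ l ∈ lines, pvOkLine l) :
    (List.foldl pvStepA (res, true) lines).1
      = (List.foldl pvStepA (res, false) (pvConsumeB lines)).1 := by
  induction lines generalizing res with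
  | nil => simp [pvConsumeB]
  | cons l rs ih =>
      have hl : pvOkLine l := hok l (List.mem_cons_self)
      have hrs : ∀ x ∈ rs, pvOkLine x := fun x hx => hok x (List.mem_cons_of_mem _ hx)
      rw [List.foldl_cons, pvConsumeB_cons]
      by_cases hc : PySem.Str.isIn "*/" l = true
      · have hp : PySem.Str.startswith l "// Problem:" = false := by
          unfold pvOkLine at hl
          cases h : PySem.Str.startswith l "// Problem:" <;> simp_all
        rw [show pvStepA (res, true) l = (res, false) from by
          unfold pvStepA; rw [hp, hc]; simp]
        rw [if_pos hc]
      · have hc' : PySem.Str.isIn "*/" l = false := by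
          cases h : PySem.Str.isIn "*/" l <;> simp_all
        rw [if_neg hc]
        by_cases hp : PySem.Str.startswith l "// Problem:" = true
        · rw [show pvStepA (res, true) l = (res, true) from by unfold pvStepA; rw [if_pos hp]]
          exact ih res hrs
        · rw [show pvStepA (res, true) l = (res, true) from by
            unfold pvStepA; rw [if_neg hp, hc']; simp]
          exact ih res hrs

-- main invariant: A's loop from a clean state produces exactly res ++ B's loop output
theorem foldA_false (n : Nat) : ∀ (lines : List String), lines.length ≤ n →
    (∀ l ∈ lines, pvOkLine l) →
    ∀ (res : List String),
      (List.foldl pvStepA (res, false) lines).1 = res ++ pvLoopB lines := by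
  induction n with
  | zero =>
      intro lines h _ res
      have : lines = [] := List.length_eq_zero_iff.mp (Nat.le_zero.mp h)
      subst this; simp [pvLoopB]
  | succ n ih =>
      intro lines h hok res
      match lines with
      | [] => simp [pvLoopB]
      | l :: rs =>
        have hrs : rs.length ≤ n := by simpa using h
        have hokrs : ∀ x ∈ rs, pvOkLine x := fun x hx => hok x (List.mem_cons_of_mem _ hx)
        rw [List.foldl_cons, pvLoopB_cons]
        by_cases hp : PySem.Str.startswith l "// Problem:" = true
        · rw [show pvStepA (res, false) l = (res, false) from by unfold pvStepA; rw [if_pos hp]]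
          rw [if_pos hp]
          exact ih rs hrs hokrs res
        · rw [if_neg hp]
          by_cases hs : PySem.Str.startswith (PySem.Str.strip l) "/*" = true
          · rw [if_pos hs, pvConsumeB_cons]
            by_cases hc : PySem.Str.isIn "*/" l = true
            · rw [show pvStepA (res, false) l = (res, false) from by
                unfold pvStepA; rw [if_neg hp, hs, hc]; simp]
              rw [if_pos hc]
              exact ih rs hrs hokrs res
            · have hc' : PySem.Str.isIn "*/" l = false := by
                cases h : PySem.Str.isIn "*/" l <;> simp_all
              rw [show pvStepA (res, false) l = (res, true) from by
                unfold pvStepA; rw [if_neg hp, hs, hc']; simp]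
              rw [if_neg hc]
              rw [foldA_true rs res hokrs]
              exact ih (pvConsumeB rs)
                (le_trans (pvConsumeB_le rs) hrs)
                (fun x hx => hokrs x (pvConsumeB_sublist rs x hx)) res
          · have hs' : PySem.Str.startswith (PySem.Str.strip l) "/*" = false := by
              cases h : PySem.Str.startswith (PySem.Str.strip l) "/*" <;> simp_all
            rw [if_neg hs]
            rw [show pvStepA (res, false) l = (res ++ [l], false) from by
              unfold pvStepA; rw [if_neg hp, hs']; simp]
            rw [ih rs hrs hokrs (res ++ [l])]
            simp

-- ===== VERDICT (by name: the statement is the Claim_ definition above) =====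
theorem extract_problem_code_spec : Claim_equal_extract_problem_code := by
  intro pc _ hpre
  unfold Spec_extract_problem_code extract_problem_code extract_problem_code_alt
  rw [foldA_false ((PySem.Str.split? pc "\n").getD []).length _ (le_refl _)
    (by intro l hl
        unfold Pre_extract_problem_code at hpre
        exact List.all_eq_true.mp hpre l hl) []]
  simp
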